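-- pv_equiv track=rewrite | github.com/showyourlucky/speech2subtitles | tests/transcribe_test_mp4_sherpa_onnx.py | pad_ranges
-- ===== SOURCE A (Python) =====
-- from typing import List, Tuple
--
-- def merge_ranges(ranges: List[Tuple[int, int]], max_gap_samples: int) -> List[Tuple[int, int]]:
--     """合并相邻间隔不超过 max_gap_samples 的分段。"""
--     if not ranges:
--         return []
--
--     sorted_ranges = sorted(ranges, key=lambda item: item[0])
--     merged: List[List[int]] = [[sorted_ranges[0][0], sorted_ranges[0][1]]]
--     for start, end in sorted_ranges[1:]:
--         last_start, last_end = merged[-1]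
--         if start - last_end <= max_gap_samples:
--             merged[-1][1] = max(last_end, end)
--         else:
--             merged.append([start, end])
--
--     return [(item[0], item[1]) for item in merged]
--
-- def pad_ranges(
--     ranges: List[Tuple[int, int]],
--     pad_samples: int,
--     total_samples: int,
-- ) -> List[Tuple[int, int]]:
--     """对每个分段前后补边，并裁剪到音频总长度范围。"""
--     padded: List[Tuple[int, int]] = []
--     for start, end in ranges:
--         padded_start = max(0, start - pad_samples)
--         padded_end = min(total_samples, end + pad_samples)
--         if padded_end > padded_start:
--             padded.append((padded_start, padded_end))
--     return merge_ranges(padded, max_gap_samples=0)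
-- ===== SOURCE B (Python) =====
-- from typing import List, Tuple
--
-- def _insert(intervals: List[Tuple[int, int]], lo: int, hi: int) -> List[Tuple[int, int]]:
--     """Insert closed interval [lo, hi] into a sorted, pairwise non-touching list,
--     merging every interval it overlaps or touches."""
--     if not intervals:
--         return [(lo, hi)]
--     s, e = intervals[0]
--     if hi < s:
--         return [(lo, hi)] + intervals
--     if e < lo:
--         return [(s, e)] + _insert(intervals[1:], lo, hi)
--     return _insert(intervals[1:], min(s, lo), max(e, hi))
--
-- def pad_ranges(
--     ranges: List[Tuple[int, int]],
--     pad_samples: int,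
--     total_samples: int,
-- ) -> List[Tuple[int, int]]:
--     """Incremental interval insertion: no sorting pass; a canonical disjoint,
--     non-touching, start-sorted interval list is maintained and each padded,
--     clipped range is inserted into it, merging on contact."""
--     merged: List[Tuple[int, int]] = []
--     for start, end in ranges:
--         lo = max(0, start - pad_samples)
--         hi = min(total_samples, end + pad_samples)
--         if hi > lo:
--             merged = _insert(merged, lo, hi)
--     return merged
-- ===== Notes on version B (the rewrite author's own statement) =====
-- stated objective: alternative
-- what changed: B never sorts: it maintains a canonical disjoint non-touching interval list and inserts each padded, clipped range into it by an interval-insertion routine that merges on contact, whereas A pads in one pass and then sorts the padded list and merges it in a second linear pass.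
import Mathlib
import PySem

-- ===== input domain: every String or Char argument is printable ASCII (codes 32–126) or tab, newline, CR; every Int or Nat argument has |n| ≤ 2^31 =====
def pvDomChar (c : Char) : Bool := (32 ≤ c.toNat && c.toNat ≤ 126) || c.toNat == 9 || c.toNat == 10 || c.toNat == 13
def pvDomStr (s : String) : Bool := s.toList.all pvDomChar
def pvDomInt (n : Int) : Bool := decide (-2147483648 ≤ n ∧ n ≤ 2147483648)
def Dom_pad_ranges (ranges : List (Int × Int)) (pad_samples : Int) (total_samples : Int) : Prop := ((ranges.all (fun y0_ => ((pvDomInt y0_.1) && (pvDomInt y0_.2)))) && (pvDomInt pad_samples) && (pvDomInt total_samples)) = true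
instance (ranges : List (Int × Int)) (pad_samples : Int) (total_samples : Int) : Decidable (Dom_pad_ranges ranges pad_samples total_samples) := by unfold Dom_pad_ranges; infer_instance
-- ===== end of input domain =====

-- B replaces A's pad-then-sort-then-linear-merge by incremental insertion into a
-- canonical disjoint interval list (no sorting pass); equivalence of return values.

-- ===== PORT A =====
-- the padding loop of pad_ranges: emits (max 0 (s-pad), min total (e+pad)) when nonempty
def padLoopA (pad_samples total_samples : Int) : List (Int × Int) → List (Int × Int)
  | [] => []
  | (s, e) :: rest =>
      let ps := max 0 (s - pad_samples)
      let pe := min total_samples (e + pad_samples)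
      if pe > ps then (ps, pe) :: padLoopA pad_samples total_samples rest
      else padLoopA pad_samples total_samples rest

-- merge_ranges' loop; acc holds `merged` newest-first (Python mutates merged[-1]), reversed at the end
def mergeLoopA (max_gap : Int) (acc : List (Int × Int)) : List (Int × Int) → List (Int × Int)
  | [] => acc
  | (s, e) :: rest =>
      match acc with
      | (ls, le) :: accRest =>
          if s - le ≤ max_gap then mergeLoopA max_gap ((ls, max le e) :: accRest) rest
          else mergeLoopA max_gap ((s, e) :: (ls, le) :: accRest) rest
      | [] => mergeLoopA max_gap [(s, e)] rest   -- unreachable: acc starts nonempty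

def merge_ranges (ranges : List (Int × Int)) (max_gap_samples : Int) : List (Int × Int) :=
  if ranges = [] then []
  else
    match PySem.List.sorted ranges (fun item => item.1) with
    | [] => []
    | (s0, e0) :: rest => (mergeLoopA max_gap_samples [(s0, e0)] rest).reverse

def pad_ranges (ranges : List (Int × Int)) (pad_samples : Int) (total_samples : Int) : List (Int × Int) :=
  merge_ranges (padLoopA pad_samples total_samples ranges) 0

-- ===== PORT B =====
-- _insert: insert [lo,hi] into a sorted non-touching interval list, merging on contact
def insB (lo hi : Int) : List (Int × Int) → List (Int × Int)
  | [] => [(lo, hi)]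
  | (s, e) :: r =>
      if hi < s then (lo, hi) :: (s, e) :: r
      else if e < lo then (s, e) :: insB lo hi r
      else insB (min s lo) (max e hi) r

def pad_ranges_alt (ranges : List (Int × Int)) (pad_samples : Int) (total_samples : Int) : List (Int × Int) :=
  ranges.foldl (fun merged se =>
    let lo := max 0 (se.1 - pad_samples)
    let hi := min total_samples (se.2 + pad_samples)
    if hi > lo then insB lo hi merged else merged) []

-- ===== PRECONDITION & SPEC =====
def Spec_pad_ranges (ranges : List (Int × Int)) (pad_samples : Int) (total_samples : Int) (out : List (Int × Int)) : Prop := out = pad_ranges_alt ranges pad_samples total_samples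
instance (ranges : List (Int × Int)) (pad_samples : Int) (total_samples : Int) (out : List (Int × Int)) : Decidable (Spec_pad_ranges ranges pad_samples total_samples out) := by unfold Spec_pad_ranges; infer_instance

-- ===== CLAIM (what is proved, stated in full; the proofs are below) =====
def Claim_equal_pad_ranges : Prop := ∀ (ranges : List (Int × Int)) (pad_samples : Int) (total_samples : Int), Dom_pad_ranges ranges pad_samples total_samples → Spec_pad_ranges ranges pad_samples total_samples (pad_ranges ranges pad_samples total_samples)

-- ===== LEMMAS AND PROOFS =====

-- coverage of the half-integer point x/2 by the closed intervals of M
def cov (M : List (Int × Int)) (x : Int) : Prop := ∃ p ∈ M, 2 * p.1 ≤ x ∧ x ≤ 2 * p.2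

-- canonical form: start-sorted, pairwise non-touching, nonempty intervals
def Canon (M : List (Int × Int)) : Prop :=
  M.Pairwise (fun a b => a.2 < b.1) ∧ ∀ p ∈ M, p.1 < p.2

lemma cov_nil (x : Int) : ¬ cov [] x := by simp [cov]

lemma cov_cons (s e : Int) (r : List (Int × Int)) (x : Int) :
    cov ((s, e) :: r) x ↔ (2 * s ≤ x ∧ x ≤ 2 * e) ∨ cov r x := by
  simp [cov]

-- a canonical list is determined by its coverage
lemma canon_unique : ∀ (M₁ M₂ : List (Int × Int)), Canon M₁ → Canon M₂ →
    (∀ x, cov M₁ x ↔ cov M₂ x) → M₁ = M₂ := by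
  intro M₁
  induction M₁ with
  | nil =>
      intro M₂ _ h2 hcov
      cases M₂ with
      | nil => rfl
      | cons b r =>
          obtain ⟨s, e⟩ := b
          have hse : s < e := h2.2 _ List.mem_cons_self
          have : cov ((s, e) :: r) (2 * s) := ⟨(s, e), List.mem_cons_self, by omega, by omega⟩
          exact absurd ((hcov (2 * s)).mpr this) (cov_nil _)
  | cons a r₁ ih =>
      intro M₂ h1 h2 hcov
      obtain ⟨s₁, e₁⟩ := a
      cases M₂ with
      | nil =>
          have hse : s₁ < e₁ := h1.2 _ List.mem_cons_self
          have : cov ((s₁, e₁) :: r₁) (2 * s₁) := ⟨(s₁, e₁), List.mem_cons_self, by omega, by omega⟩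
          exact absurd ((hcov (2 * s₁)).mp this) (cov_nil _)
      | cons b r₂ =>
          obtain ⟨s₂, e₂⟩ := b
          have hv1 : s₁ < e₁ := h1.2 _ List.mem_cons_self
          have hv2 : s₂ < e₂ := h2.2 _ List.mem_cons_self
          have hp1 : ∀ p ∈ r₁, e₁ < p.1 := by
            intro p hp; exact (List.pairwise_cons.mp h1.1).1 p hp
          have hp2 : ∀ p ∈ r₂, e₂ < p.1 := by
            intro p hp; exact (List.pairwise_cons.mp h2.1).1 p hp
          -- starts are equal
          have hs12 : s₂ ≤ s₁ := by
            have : cov ((s₂, e₂) :: r₂) (2 * s₁) :=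
              (hcov _).mp ⟨(s₁, e₁), List.mem_cons_self, by omega, by omega⟩
            obtain ⟨p, hp, h⟩ := this
            rcases List.mem_cons.mp hp with h' | h'
            · rw [h'] at h; omega
            · have := hp2 p h'; omega
          have hs21 : s₁ ≤ s₂ := by
            have : cov ((s₁, e₁) :: r₁) (2 * s₂) :=
              (hcov _).mpr ⟨(s₂, e₂), List.mem_cons_self, by omega, by omega⟩
            obtain ⟨p, hp, h⟩ := this
            rcases List.mem_cons.mp hp with h' | h'
            · rw [h'] at h; omega
            · have := hp1 p h'; omega
          have hs : s₁ = s₂ := le_antisymm hs21 hs12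
          -- ends are equal
          have he12 : ¬ e₁ < e₂ := by
            intro hlt
            have : cov ((s₁, e₁) :: r₁) (2 * e₁ + 1) :=
              (hcov _).mpr ⟨(s₂, e₂), List.mem_cons_self, by omega, by omega⟩
            obtain ⟨p, hp, h⟩ := this
            rcases List.mem_cons.mp hp with h' | h'
            · rw [h'] at h; omega
            · have := hp1 p h'; omega
          have he21 : ¬ e₂ < e₁ := by
            intro hlt
            have : cov ((s₂, e₂) :: r₂) (2 * e₂ + 1) :=
              (hcov _).mp ⟨(s₁, e₁), List.mem_cons_self, by omega, by omega⟩
            obtain ⟨p, hp, h⟩ := this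
            rcases List.mem_cons.mp hp with h' | h'
            · rw [h'] at h; omega
            · have := hp2 p h'; omega
          have he : e₁ = e₂ := by omega
          subst hs; subst he
          -- tails coincide
          have htail : ∀ x, cov r₁ x ↔ cov r₂ x := by
            intro x
            constructor
            · intro hx
              obtain ⟨p, hp, h⟩ := hx
              have hx1 : 2 * e₁ < x := by have := hp1 p hp; omega
              have : cov ((s₁, e₁) :: r₂) x :=
                (hcov x).mp ⟨p, List.mem_cons_of_mem _ hp, h.1, h.2⟩
              obtain ⟨q, hq, hq2⟩ := this
              rcases List.mem_cons.mp hq with h' | h'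
              · rw [h'] at hq2; omega
              · exact ⟨q, h', hq2⟩
            · intro hx
              obtain ⟨p, hp, h⟩ := hx
              have hx1 : 2 * e₁ < x := by have := hp2 p hp; omega
              have : cov ((s₁, e₁) :: r₁) x :=
                (hcov x).mpr ⟨p, List.mem_cons_of_mem _ hp, h.1, h.2⟩
              obtain ⟨q, hq, hq2⟩ := this
              rcases List.mem_cons.mp hq with h' | h'
              · rw [h'] at hq2; omega
              · exact ⟨q, h', hq2⟩
          have := ih r₂ ⟨(List.pairwise_cons.mp h1.1).2, fun p hp => h1.2 p (List.mem_cons_of_mem _ hp)⟩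
            ⟨(List.pairwise_cons.mp h2.1).2, fun p hp => h2.2 p (List.mem_cons_of_mem _ hp)⟩ htail
          rw [this]

-- ---- A-side: merge_ranges 0 produces the canonical form of its input ----

def mGo (cs ce : Int) : List (Int × Int) → List (Int × Int)
  | [] => [(cs, ce)]
  | (s, e) :: rest => if s - ce ≤ 0 then mGo cs (max ce e) rest else (cs, ce) :: mGo s e rest

def mTop : List (Int × Int) → List (Int × Int)
  | [] => []
  | (s, e) :: rest => mGo s e rest

lemma mGo_cons (cs ce s e : Int) (l : List (Int × Int)) :
    mGo cs ce ((s, e) :: l) = if s - ce ≤ 0 then mGo cs (max ce e) l else (cs, ce) :: mGo s e l := rfl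

lemma mergeLoopA_reverse (l : List (Int × Int)) :
    ∀ acc cs ce, (mergeLoopA 0 ((cs, ce) :: acc) l).reverse = acc.reverse ++ mGo cs ce l := by
  induction l with
  | nil => intro acc cs ce; simp [mergeLoopA, mGo]
  | cons a rest ih =>
      intro acc cs ce
      obtain ⟨s, e⟩ := a
      rw [mGo_cons]
      show (if s - ce ≤ 0 then mergeLoopA 0 ((cs, max ce e) :: acc) rest
            else mergeLoopA 0 ((s, e) :: (cs, ce) :: acc) rest).reverse = _
      by_cases h : s - ce ≤ (0 : Int)
      · rw [if_pos h, if_pos h, ih]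
      · rw [if_neg h, if_neg h, ih]
        simp

lemma merge_ranges_eq_mTop (l : List (Int × Int)) :
    merge_ranges l 0 = mTop (PySem.List.sorted l (fun item => item.1)) := by
  unfold merge_ranges
  by_cases h : l = []
  · subst h; rfl
  · rw [if_neg h]
    have hne : PySem.List.sorted l (fun item => item.1) ≠ [] := by
      rw [Ne, PySem.List.sorted_eq_nil_iff]; exact h
    cases hsl : PySem.List.sorted l (fun item => item.1) with
    | nil => exact absurd hsl hne
    | cons a rest =>
        obtain ⟨s0, e0⟩ := a
        show (mergeLoopA 0 [(s0, e0)] rest).reverse = mGo s0 e0 rest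
        have := mergeLoopA_reverse rest [] s0 e0
        simpa using this

lemma mGo_spec : ∀ (l : List (Int × Int)) (cs ce : Int), cs < ce →
    l.Pairwise (fun a b => a.1 ≤ b.1) → (∀ p ∈ l, cs ≤ p.1 ∧ p.1 < p.2) →
    Canon (mGo cs ce l) ∧ (∀ p ∈ mGo cs ce l, cs ≤ p.1) ∧
      (∀ x, cov (mGo cs ce l) x ↔ (2 * cs ≤ x ∧ x ≤ 2 * ce) ∨ cov l x) := by
  intro l
  induction l with
  | nil =>
      intro cs ce hce _ _
      refine ⟨⟨List.pairwise_singleton _ _, ?_⟩, ?_, ?_⟩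
      · intro p hp; simp [mGo] at hp; simp [hp]; omega
      · intro p hp; simp [mGo] at hp; simp [hp]
      · intro x; simp [mGo, cov_cons, cov_nil]
  | cons a rest ih =>
      intro cs ce hce hsort hmem
      obtain ⟨s, e⟩ := a
      have hcs : cs ≤ s := (hmem _ List.mem_cons_self).1
      have hse : s < e := (hmem _ List.mem_cons_self).2
      have hrest_sort := (List.pairwise_cons.mp hsort).2
      have hrest_ge : ∀ p ∈ rest, s ≤ p.1 := (List.pairwise_cons.mp hsort).1
      rw [mGo_cons]
      by_cases h : s - ce ≤ (0 : Int)
      · rw [if_pos h]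
        have hmem' : ∀ p ∈ rest, cs ≤ p.1 ∧ p.1 < p.2 := fun p hp =>
          ⟨le_trans hcs (hrest_ge p hp), (hmem p (List.mem_cons_of_mem _ hp)).2⟩
        obtain ⟨hc, hm, hx⟩ := ih cs (max ce e) (by omega) hrest_sort hmem'
        refine ⟨hc, hm, ?_⟩
        intro x
        rw [hx x, cov_cons]
        by_cases hcr : cov rest x
        · tauto
        · simp only [hcr, or_false]; omega
      · rw [if_neg h]
        have hmem' : ∀ p ∈ rest, s ≤ p.1 ∧ p.1 < p.2 := fun p hp =>
          ⟨hrest_ge p hp, (hmem p (List.mem_cons_of_mem _ hp)).2⟩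
        obtain ⟨hc, hm, hx⟩ := ih s e hse hrest_sort hmem'
        refine ⟨⟨?_, ?_⟩, ?_, ?_⟩
        · refine List.pairwise_cons.mpr ⟨?_, hc.1⟩
          intro p hp
          have := hm p hp
          show ce < p.1
          omega
        · intro p hp
          rcases List.mem_cons.mp hp with h' | h'
          · rw [h']; exact hce
          · exact hc.2 p h'
        · intro p hp
          rcases List.mem_cons.mp hp with h' | h'
          · rw [h']
          · have := hm p h'; omega
        · intro x
          rw [cov_cons, hx x, cov_cons]

lemma mTop_spec (l : List (Int × Int)) (hsort : l.Pairwise (fun a b => a.1 ≤ b.1))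
    (hv : ∀ p ∈ l, p.1 < p.2) :
    Canon (mTop l) ∧ ∀ x, cov (mTop l) x ↔ cov l x := by
  cases l with
  | nil => exact ⟨⟨List.Pairwise.nil, by simp [mTop]⟩, fun x => Iff.rfl⟩
  | cons a rest =>
      obtain ⟨s, e⟩ := a
      have hse : s < e := hv _ List.mem_cons_self
      have hmem : ∀ p ∈ rest, s ≤ p.1 ∧ p.1 < p.2 := fun p hp =>
        ⟨(List.pairwise_cons.mp hsort).1 p hp, hv p (List.mem_cons_of_mem _ hp)⟩
      obtain ⟨hc, _, hx⟩ := mGo_spec rest s e hse (List.pairwise_cons.mp hsort).2 hmem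
      refine ⟨hc, ?_⟩
      intro x
      show cov (mGo s e rest) x ↔ cov ((s, e) :: rest) x
      rw [hx x, cov_cons]

-- ---- B-side: insB preserves the canonical form and adds [lo,hi] to the coverage ----

lemma insB_cons (lo hi s e : Int) (r : List (Int × Int)) :
    insB lo hi ((s, e) :: r) =
      if hi < s then (lo, hi) :: (s, e) :: r
      else if e < lo then (s, e) :: insB lo hi r
      else insB (min s lo) (max e hi) r := rfl

lemma insB_spec : ∀ (M : List (Int × Int)) (lo hi : Int), lo < hi → Canon M →
    Canon (insB lo hi M) ∧ (∀ p ∈ insB lo hi M, lo ≤ p.1 ∨ ∃ q ∈ M, q.1 ≤ p.1) ∧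
      (∀ x, cov (insB lo hi M) x ↔ (2 * lo ≤ x ∧ x ≤ 2 * hi) ∨ cov M x) := by
  intro M
  induction M with
  | nil =>
      intro lo hi hlh _
      refine ⟨⟨List.pairwise_singleton _ _, ?_⟩, ?_, ?_⟩
      · intro p hp; simp [insB] at hp; simp [hp]; omega
      · intro p hp; simp [insB] at hp; simp [hp]
      · intro x; simp [insB, cov_cons, cov_nil]
  | cons a r ih =>
      intro lo hi hlh hM
      obtain ⟨s, e⟩ := a
      have hse : s < e := hM.2 _ List.mem_cons_self
      have hr_pair := (List.pairwise_cons.mp hM.1).2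
      have hr_gt : ∀ p ∈ r, e < p.1 := (List.pairwise_cons.mp hM.1).1
      have hrC : Canon r := ⟨hr_pair, fun p hp => hM.2 p (List.mem_cons_of_mem _ hp)⟩
      rw [insB_cons]
      by_cases h1 : hi < s
      · rw [if_pos h1]
        refine ⟨⟨?_, ?_⟩, ?_, ?_⟩
        · refine List.pairwise_cons.mpr ⟨?_, hM.1⟩
          intro p hp
          rcases List.mem_cons.mp hp with h' | h'
          · rw [h']; exact h1
          · have := hr_gt p h'; show hi < p.1; omega
        · intro p hp
          rcases List.mem_cons.mp hp with h' | h'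
          · rw [h']; exact hlh
          · exact hM.2 p h'
        · intro p hp
          rcases List.mem_cons.mp hp with h' | h'
          · left; rw [h']
          · right; exact ⟨p, h', le_rfl⟩
        · intro x; rw [cov_cons]
      · rw [if_neg h1]
        by_cases h2 : e < lo
        · rw [if_pos h2]
          obtain ⟨hc, hm, hx⟩ := ih lo hi hlh hrC
          refine ⟨⟨?_, ?_⟩, ?_, ?_⟩
          · refine List.pairwise_cons.mpr ⟨?_, hc.1⟩
            intro p hp
            rcases hm p hp with h' | ⟨q, hq, hql⟩
            · show e < p.1; omega
            · have := hr_gt q hq; show e < p.1; omega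
          · intro p hp
            rcases List.mem_cons.mp hp with h' | h'
            · rw [h']; exact hse
            · exact hc.2 p h'
          · intro p hp
            rcases List.mem_cons.mp hp with h' | h'
            · right; exact ⟨(s, e), List.mem_cons_self, by rw [h']⟩
            · rcases hm p h' with h'' | ⟨q, hq, hql⟩
              · left; exact h''
              · right; exact ⟨q, List.mem_cons_of_mem _ hq, hql⟩
          · intro x
            rw [cov_cons, hx x, cov_cons]
            tauto
        · rw [if_neg h2]
          obtain ⟨hc, hm, hx⟩ := ih (min s lo) (max e hi) (by omega) hrC
          refine ⟨hc, ?_, ?_⟩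
          · intro p hp
            rcases hm p hp with h' | ⟨q, hq, hql⟩
            · rcases le_or_gt lo s with h'' | h''
              · left; omega
              · right; exact ⟨(s, e), List.mem_cons_self, by omega⟩
            · right; exact ⟨q, List.mem_cons_of_mem _ hq, hql⟩
          · intro x
            rw [hx x, cov_cons]
            by_cases hcr : cov r x
            · tauto
            · simp only [hcr, or_false]; omega

-- B's fold, with the padded list factored out
lemma foldB_eq (p t : Int) : ∀ (l : List (Int × Int)) (M : List (Int × Int)),
    (l.foldl (fun merged se =>
      let lo := max 0 (se.1 - p)
      let hi := min t (se.2 + p)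
      if hi > lo then insB lo hi merged else merged) M) =
    ((padLoopA p t l).foldl (fun merged q => insB q.1 q.2 merged) M) := by
  intro l
  induction l with
  | nil => intro M; rfl
  | cons a rest ih =>
      intro M
      obtain ⟨s, e⟩ := a
      show (rest.foldl _ (if min t (e + p) > max 0 (s - p) then insB (max 0 (s - p)) (min t (e + p)) M else M)) = _
      rw [padLoopA]
      by_cases h : min t (e + p) > max 0 (s - p)
      · rw [if_pos h, if_pos h, List.foldl_cons, ih]
      · rw [if_neg h, if_neg h, ih]

lemma foldB_spec : ∀ (l : List (Int × Int)) (M : List (Int × Int)),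
    (∀ p ∈ l, p.1 < p.2) → Canon M →
    Canon (l.foldl (fun merged q => insB q.1 q.2 merged) M) ∧
      ∀ x, cov (l.foldl (fun merged q => insB q.1 q.2 merged) M) x ↔ cov M x ∨ cov l x := by
  intro l
  induction l with
  | nil =>
      intro M _ hM
      exact ⟨hM, fun x => by simp [cov_nil]⟩
  | cons a rest ih =>
      intro M hv hM
      obtain ⟨s, e⟩ := a
      have hse : s < e := hv _ List.mem_cons_self
      obtain ⟨hc, _, hx⟩ := insB_spec M s e hse hM
      obtain ⟨hc', hx'⟩ := ih (insB s e M) (fun p hp => hv p (List.mem_cons_of_mem _ hp)) hc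
      refine ⟨hc', ?_⟩
      intro x
      rw [List.foldl_cons]
      show cov (rest.foldl _ (insB s e M)) x ↔ _
      rw [hx' x, hx x, cov_cons]
      tauto

lemma valid_padLoopA (p t : Int) : ∀ (l : List (Int × Int)), ∀ q ∈ padLoopA p t l, q.1 < q.2 := by
  intro l
  induction l with
  | nil => simp [padLoopA]
  | cons a rest ih =>
      obtain ⟨s, e⟩ := a
      intro q hq
      rw [padLoopA] at hq
      by_cases h : min t (e + p) > max 0 (s - p)
      · rw [if_pos h] at hq
        rcases List.mem_cons.mp hq with h' | h'
        · rw [h']; exact h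
        · exact ih q h'
      · rw [if_neg h] at hq
        exact ih q hq

lemma cov_perm {l₁ l₂ : List (Int × Int)} (hp : l₁.Perm l₂) (x : Int) : cov l₁ x ↔ cov l₂ x := by
  unfold cov
  constructor
  · rintro ⟨p, hp', h⟩; exact ⟨p, hp.mem_iff.mp hp', h⟩
  · rintro ⟨p, hp', h⟩; exact ⟨p, hp.mem_iff.mpr hp', h⟩

-- ===== VERDICT (by name: the statement is the Claim_ definition above) =====
theorem pad_ranges_spec : Claim_equal_pad_ranges := by
  intro ranges p t _
  unfold Spec_pad_ranges pad_ranges pad_ranges_alt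
  rw [merge_ranges_eq_mTop, foldB_eq]
  set L := padLoopA p t ranges with hL
  have hvL : ∀ q ∈ L, q.1 < q.2 := valid_padLoopA p t ranges
  have hperm : (PySem.List.sorted L (fun item => item.1)).Perm L :=
    PySem.List.sorted_perm L (fun item => item.1) false
  have hvS : ∀ q ∈ PySem.List.sorted L (fun item => item.1), q.1 < q.2 :=
    fun q hq => hvL q (hperm.mem_iff.mp hq)
  obtain ⟨hcA, hxA⟩ := mTop_spec (PySem.List.sorted L (fun item => item.1))
    (PySem.List.sorted_pairwise L (fun item => item.1)) hvS
  obtain ⟨hcB, hxB⟩ := foldB_spec L [] hvL ⟨List.Pairwise.nil, by simp⟩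
  apply canon_unique _ _ hcA hcB
  intro x
  rw [hxA x, hxB x, cov_perm hperm x]
  simp [cov_nil]
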